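-- pv_equiv track=rewrite | github.com/BelhajMArouenne1994/WebScraping00 | All Languages/Data_Processing/CleanDataSets.py | whichLanguage
-- ===== SOURCE A (Python) =====
-- def whichLanguage(scorelist):
--     """This function just returns the language name, from a given
--     "scorelist" dictionary as defined above."""
--     maximum = 0
--     try:
--         for item in scorelist:
--             value = scorelist[item]
--             if maximum < value:
--                 maximum = value
--                 lang = item
--         return lang
--     except:
--         return ""
-- ===== SOURCE B (Python) =====
-- def whichLanguage(scorelist):
--     """Two-pass re-implementation: first find the maximum value, then
--     locate the first key carrying it; "" when empty or no positive score."""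
--     values = [scorelist[k] for k in scorelist]
--     if not values:
--         return ""
--     best = max(values)
--     if best <= 0:
--         return ""
--     for k in scorelist:
--         if scorelist[k] == best:
--             return k
-- ===== Notes on version B (the rewrite author's own statement) =====
-- stated objective: alternative
-- what changed: Replaces A's single try/except argmax loop (running maximum plus a possibly-unbound lang variable) by two explicit passes: compute the maximum value, return "" if there are no values or none is positive, then return the first key whose value equals the maximum.
import Mathlib
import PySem

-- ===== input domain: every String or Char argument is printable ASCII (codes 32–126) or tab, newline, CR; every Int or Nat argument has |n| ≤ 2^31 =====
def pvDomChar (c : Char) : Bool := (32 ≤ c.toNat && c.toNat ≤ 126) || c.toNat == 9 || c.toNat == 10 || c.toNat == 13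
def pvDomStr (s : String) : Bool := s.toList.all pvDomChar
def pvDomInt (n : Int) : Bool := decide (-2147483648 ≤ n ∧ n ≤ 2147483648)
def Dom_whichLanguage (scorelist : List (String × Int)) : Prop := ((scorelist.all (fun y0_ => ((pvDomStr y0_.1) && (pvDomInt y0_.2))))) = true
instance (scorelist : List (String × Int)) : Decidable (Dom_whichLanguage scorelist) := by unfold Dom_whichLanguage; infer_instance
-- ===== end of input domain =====

-- B replaces A's single running-argmax loop (with its possibly-unbound `lang`) by two passes:
-- max of the values, then first key carrying it; same O(n) cost, plainer control flow.

-- ===== PORT A =====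
-- A's loop: `for item in scorelist: value = scorelist[item]; if maximum < value: maximum = value; lang = item`.
-- Iterating the dict's items gives exactly the pairs (item, scorelist[item]) in key order (dict keys are unique).
-- `lang : Option String`: none = the variable was never assigned, so `return lang` raises NameError → except → "".
def whichLanguageGo : List (String × Int) → Int → Option String → Option String
  | [], _, lang => lang
  | (k, v) :: rest, maximum, lang =>
      if maximum < v then whichLanguageGo rest v (some k)
      else whichLanguageGo rest maximum lang

def whichLanguage (scorelist : List (String × Int)) : String :=
  match whichLanguageGo (PySem.Dict.ofList scorelist).items 0 none with
  | some lang => lang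
  | none => ""

-- ===== PORT B =====
def whichLanguage_alt (scorelist : List (String × Int)) : String :=
  match PySem.List.max? ((PySem.Dict.ofList scorelist).items.map (fun p => p.2)) (fun v => v) with  -- values = [scorelist[k] for k in scorelist]
  | none => ""                               -- `if not values: return ""`
  | some best =>
      if best ≤ 0 then ""
      else
        match (PySem.Dict.ofList scorelist).items.find? (fun p => p.2 == best) with
        | some p => p.1
        | none => ""                         -- unreachable: best is one of the values

-- ===== PRECONDITION & SPEC =====
def Spec_whichLanguage (scorelist : List (String × Int)) (out : String) : Prop := out = whichLanguage_alt scorelist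
instance (scorelist : List (String × Int)) (out : String) : Decidable (Spec_whichLanguage scorelist out) := by unfold Spec_whichLanguage; infer_instance

-- ===== CLAIM (what is proved, stated in full; the proofs are below) =====
def Claim_equal_whichLanguage : Prop := ∀ (scorelist : List (String × Int)), Dom_whichLanguage scorelist → Spec_whichLanguage scorelist (whichLanguage scorelist)

-- ===== LEMMAS AND PROOFS =====

-- running max of the second components
def pvFmax (L : List (String × Int)) (m : Int) : Int := L.foldl (fun a p => max a p.2) m

theorem pvFmax_cons (k : String) (v m : Int) (L : List (String × Int)) :
    pvFmax ((k, v) :: L) m = pvFmax L (max m v) := rfl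

theorem le_pvFmax (L : List (String × Int)) (m : Int) : m ≤ pvFmax L m := by
  induction L generalizing m with
  | nil => simp [pvFmax]
  | cons p rest ih =>
      calc m ≤ max m p.2 := le_max_left _ _
        _ ≤ pvFmax rest (max m p.2) := ih _
        _ = pvFmax (p :: rest) m := rfl

theorem mem_le_pvFmax (L : List (String × Int)) (m : Int) (p : String × Int)
    (hp : p ∈ L) : p.2 ≤ pvFmax L m := by
  induction L generalizing m with
  | nil => cases hp
  | cons q rest ih =>
      rcases List.mem_cons.mp hp with h | h
      · subst h
        calc p.2 ≤ max m p.2 := le_max_right _ _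
          _ ≤ pvFmax rest (max m p.2) := le_pvFmax _ _
          _ = pvFmax (p :: rest) m := rfl
      · exact ih _ h

theorem pvFmax_of_all_le (L : List (String × Int)) (m : Int)
    (h : ∀ p ∈ L, p.2 ≤ m) : pvFmax L m = m := by
  induction L with
  | nil => rfl
  | cons q rest ih =>
      have hq : max m q.2 = m := max_eq_left (h q (List.mem_cons_self ..))
      show pvFmax rest (max m q.2) = m
      rw [hq]
      exact ih (fun p hp => h p (List.mem_cons_of_mem _ hp))

theorem pvFmax_mem_or (L : List (String × Int)) (m : Int) :
    pvFmax L m = m ∨ ∃ p ∈ L, pvFmax L m = p.2 := by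
  induction L generalizing m with
  | nil => exact Or.inl rfl
  | cons q rest ih =>
      rcases ih (max m q.2) with h | ⟨p, hp, h⟩
      · rcases max_cases m q.2 with ⟨he, _⟩ | ⟨he, _⟩
        · exact Or.inl (by show pvFmax rest (max m q.2) = m; omega)
        · refine Or.inr ⟨q, List.mem_cons_self .., ?_⟩
          show pvFmax rest (max m q.2) = q.2; omega
      · exact Or.inr ⟨p, List.mem_cons_of_mem _ hp, h⟩

theorem pvFmax_max_left (L : List (String × Int)) (a b : Int) :
    pvFmax L (max a b) = max a (pvFmax L b) := by
  induction L generalizing b with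
  | nil => rfl
  | cons q rest ih =>
      show pvFmax rest (max (max a b) q.2) = max a (pvFmax rest (max b q.2))
      rw [max_assoc, ih]

-- A's loop computes: if some value beats m, the key of the first pair attaining the final maximum.
theorem whichLanguageGo_spec (L : List (String × Int)) (m : Int) (lang : Option String) :
    whichLanguageGo L m lang =
      if ∃ p ∈ L, m < p.2 then
        (L.find? (fun p => p.2 == pvFmax L m)).map Prod.fst
      else lang := by
  induction L generalizing m lang with
  | nil => simp [whichLanguageGo]
  | cons q rest ih =>
      obtain ⟨k, v⟩ := q
      by_cases hmv : m < v
      · have hmax : max m v = v := max_eq_right (le_of_lt hmv)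
        have hex : ∃ p ∈ (k, v) :: rest, m < p.2 := ⟨(k, v), List.mem_cons_self .., hmv⟩
        rw [whichLanguageGo, if_pos hmv, ih, if_pos hex, pvFmax_cons, hmax]
        by_cases hr : ∃ p ∈ rest, v < p.2
        · -- the final max lies strictly above v, so the head is not the first attaining pair
          obtain ⟨p, hp, hvp⟩ := hr
          have hlt : v < pvFmax rest v := lt_of_lt_of_le hvp (mem_le_pvFmax rest v p hp)
          rw [if_pos ⟨p, hp, hvp⟩, List.find?_cons_of_neg]
          simp only [beq_iff_eq]
          omega
        · -- all of rest ≤ v: the final max is v, attained at the head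
          push Not at hr
          have hfe : pvFmax rest v = v := pvFmax_of_all_le rest v hr
          rw [if_neg (by push Not; exact hr), hfe,
            List.find?_cons_of_pos (by simp)]
          rfl
      · have hvm : v ≤ m := le_of_not_gt hmv
        have hmax : max m v = m := max_eq_left hvm
        rw [whichLanguageGo, if_neg hmv, ih, pvFmax_cons, hmax]
        by_cases hr : ∃ p ∈ rest, m < p.2
        · obtain ⟨p, hp, hmp⟩ := hr
          have hlt : v < pvFmax rest m :=
            lt_of_le_of_lt hvm (lt_of_lt_of_le hmp (mem_le_pvFmax rest m p hp))
          rw [if_pos ⟨p, hp, hmp⟩,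
            if_pos ⟨p, List.mem_cons_of_mem _ hp, hmp⟩,
            List.find?_cons_of_neg]
          simp only [beq_iff_eq]
          omega
        · rw [if_neg hr, if_neg]
          push Not at hr ⊢
          intro p hp
          rcases List.mem_cons.mp hp with h | h
          · subst h; exact hvm
          · exact hr p h

theorem whichLanguage_eq_alt (scorelist : List (String × Int)) :
    whichLanguage scorelist = whichLanguage_alt scorelist := by
  unfold whichLanguage whichLanguage_alt
  generalize (PySem.Dict.ofList scorelist).items = L
  rw [whichLanguageGo_spec]

  cases L with
  | nil => simp [PySem.List.max?]
  | cons q rest =>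
      obtain ⟨k, v⟩ := q
      rw [List.map_cons, PySem.List.max?_id_cons]
      have hbest : (rest.map (fun p => p.2)).foldl max v = pvFmax rest v := by
        unfold pvFmax
        rw [List.foldl_map]
      have hM : pvFmax ((k, v) :: rest) 0 = max 0 (pvFmax rest v) := by
        rw [pvFmax_cons, show max (0:Int) v = max 0 v from rfl, ← pvFmax_max_left]
      by_cases hpos : ∃ p ∈ (k, v) :: rest, (0:Int) < p.2
      · -- some positive value exists: both sides return the first key attaining the max
        have hbpos : 0 < pvFmax rest v := by
          obtain ⟨p, hp, hpp⟩ := hpos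
          have h1 : p.2 ≤ pvFmax ((k, v) :: rest) 0 := mem_le_pvFmax _ _ _ hp
          rw [hM] at h1; omega
        have hMv : pvFmax ((k, v) :: rest) 0 = pvFmax rest v := by
          rw [hM]; omega
        rw [if_pos hpos, hbest, hMv]
        -- find? is some: the max is attained by some pair
        rcases pvFmax_mem_or ((k, v) :: rest) 0 with h | ⟨p, hp, h⟩
        · rw [hMv] at h; omega
        · rw [hMv] at h
          have hne : ((k, v) :: rest).find? (fun p => p.2 == pvFmax rest v) ≠ none := by
            intro hn
            have := List.find?_eq_none.mp hn p hp
            simp [h] at this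
          cases hf : ((k, v) :: rest).find? (fun p => p.2 == pvFmax rest v) with
          | none => exact absurd hf hne
          | some r => simp [hf, not_le.mpr hbpos]
      · -- no positive value: A never assigns lang, B sees best ≤ 0
        have hb0 : pvFmax rest v ≤ 0 := by
          have h1 : pvFmax ((k, v) :: rest) 0 = 0 := by
            push Not at hpos
            exact pvFmax_of_all_le _ _ hpos
          rw [hM] at h1; omega
        rw [if_neg hpos, hbest]
        simp [hb0]

-- ===== VERDICT (by name: the statement is the Claim_ definition above) =====
theorem whichLanguage_spec : Claim_equal_whichLanguage := by
  intro scorelist _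
  exact whichLanguage_eq_alt scorelist
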